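-- pv_equiv track=rewrite | github.com/snji-khjuria/OntologyBuilder | PredictionShowManHtml.py | readSentences
-- ===== SOURCE A (Python) =====
-- def readSentences(lines):
--     sentences = []
--     predictedSentences = []
--     goldSentences      = []
--     sentence = ""
--     predictedSentence  = ""
--     goldSentence       = ""
--     for line in lines:
--         line = line.strip()
--         if len(line)==0:
--             sentences.append(sentence)
--             predictedSentences.append(predictedSentence)
--             goldSentences.append(goldSentence)
--             sentence          = ""
--             goldSentence      = ""
--             predictedSentence = ""
--         else:
--             line = line.split()
--             sentence+=" " + line[0]
--             goldLabel = line[2]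
--             if goldLabel=="O":
--                 goldLabel = ""
--             else:
--                 goldLabel="/"+goldLabel
--             weakLabel = line[3]
--             if weakLabel=="O":
--                 weakLabel = ""
--             else:
--                 weakLabel = "/" + weakLabel
--             goldSentence+=" " + line[0] + goldLabel
--             predictedSentence+=" " + line[0]+weakLabel
--     return (sentences, goldSentences, predictedSentences)
-- ===== SOURCE B (Python) =====
-- def readSentences(lines):
--     # First pass: group lines into blocks of (word, gold, weak) field triples,
--     # one block per blank line (a trailing unterminated block is discarded,
--     # as in the original).
--     blocks = []
--     cur = []
--     for line in lines:
--         stripped = line.strip()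
--         if stripped:
--             t = stripped.split()
--             cur.append((t[0], t[2], t[3]))
--         else:
--             blocks.append(cur)
--             cur = []
--     sentences = ["".join(" " + w for w, g, p in b) for b in blocks]
--     goldSentences = ["".join(" " + w + ("" if g == "O" else "/" + g) for w, g, p in b) for b in blocks]
--     predictedSentences = ["".join(" " + w + ("" if p == "O" else "/" + p) for w, g, p in b) for b in blocks]
--     return (sentences, goldSentences, predictedSentences)
-- ===== Notes on version B (the rewrite author's own statement) =====
-- stated objective: alternative
-- what changed: B first groups the token lines into blocks (one block per blank line) and then renders the three output lists by mapping a join over the blocks, instead of A's single loop threading six string/list accumulators.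
import Mathlib
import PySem

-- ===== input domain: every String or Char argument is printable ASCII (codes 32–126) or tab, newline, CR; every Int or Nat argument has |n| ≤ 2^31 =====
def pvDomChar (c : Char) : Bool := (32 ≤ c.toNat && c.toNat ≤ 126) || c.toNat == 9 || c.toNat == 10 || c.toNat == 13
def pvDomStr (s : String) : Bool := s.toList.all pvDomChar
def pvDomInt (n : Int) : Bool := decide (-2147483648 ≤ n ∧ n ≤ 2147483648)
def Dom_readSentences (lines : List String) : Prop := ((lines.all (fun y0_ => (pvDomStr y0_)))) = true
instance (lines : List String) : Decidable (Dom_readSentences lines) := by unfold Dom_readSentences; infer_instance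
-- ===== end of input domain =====

-- B groups the lines into blocks first and then maps three joins over the blocks; same values as A,
-- a different decomposition (not claimed faster).

-- ===== PORT A =====
-- One fold over the lines, threading A's six accumulators (the three result
-- lists and the three current strings), exactly as A's loop body does.
-- Where Python would raise IndexError (token line with < 4 fields, excluded by
-- Pre_), pyGet? is defaulted with "" — never reached inside Pre_.
def readAStep (st : (List String × List String × List String) × (String × String × String))
    (line : String) : (List String × List String × List String) × (String × String × String) :=
  let t := PySem.Str.strip line
  if PySem.Str.len t == 0 then
    ((st.1.1 ++ [st.2.1], st.1.2.1 ++ [st.2.2.1], st.1.2.2 ++ [st.2.2.2]), ("", "", ""))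
  else
    let toks := PySem.Str.split₀ t
    let w := (PySem.List.pyGet? toks 0).getD ""
    let g0 := (PySem.List.pyGet? toks 2).getD ""
    let goldLabel := if g0 == "O" then "" else "/" ++ g0
    let p0 := (PySem.List.pyGet? toks 3).getD ""
    let weakLabel := if p0 == "O" then "" else "/" ++ p0
    (st.1, (st.2.1 ++ " " ++ w, st.2.2.1 ++ " " ++ w ++ goldLabel, st.2.2.2 ++ " " ++ w ++ weakLabel))

def readSentences (lines : List String) : List String × List String × List String :=
  let r := lines.foldl readAStep (([], [], []), ("", "", ""))
  (r.1.1, r.1.2.1, r.1.2.2)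

-- ===== PORT B =====
-- first pass: blocks of (word, gold, weak) field triples, one block per blank
-- line; the trailing unterminated block is dropped.  Where Python would raise
-- IndexError (token line with < 4 fields, excluded by Pre_), pyGet? is
-- defaulted with "" — never reached inside Pre_.
def blocksStep (st : List (List (String × String × String)) × List (String × String × String))
    (line : String) : List (List (String × String × String)) × List (String × String × String) :=
  let stripped := PySem.Str.strip line
  if stripped == "" then (st.1 ++ [st.2], [])
  else
    let t := PySem.Str.split₀ stripped
    (st.1, st.2 ++ [((PySem.List.pyGet? t 0).getD "", (PySem.List.pyGet? t 2).getD "",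
      (PySem.List.pyGet? t 3).getD "")])

def sentPart (t : String × String × String) : String := " " ++ t.1

def goldPart (t : String × String × String) : String :=
  " " ++ t.1 ++ (if t.2.1 == "O" then "" else "/" ++ t.2.1)

def predPart (t : String × String × String) : String :=
  " " ++ t.1 ++ (if t.2.2 == "O" then "" else "/" ++ t.2.2)

def readSentences_alt (lines : List String) : List String × List String × List String :=
  let blocks := (lines.foldl blocksStep ([], [])).1
  (blocks.map (fun b => PySem.Str.join "" (b.map sentPart)),
   blocks.map (fun b => PySem.Str.join "" (b.map goldPart)),
   blocks.map (fun b => PySem.Str.join "" (b.map predPart)))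

-- ===== PRECONDITION & SPEC =====
-- Pre_ excludes exactly the inputs on which Python A raises IndexError: a
-- non-blank line whose whitespace split has fewer than 4 fields.
def Pre_readSentences (lines : List String) : Prop :=
  ∀ line ∈ lines, PySem.Str.strip line = "" ∨ 4 ≤ (PySem.Str.split₀ (PySem.Str.strip line)).length
instance (lines : List String) : Decidable (Pre_readSentences lines) := by unfold Pre_readSentences; infer_instance
def pvWitness_readSentences : List String := ["dog B O PER", "ran N O O", "", "  "]

def Spec_readSentences (lines : List String) (out : List String × List String × List String) : Prop := out = readSentences_alt lines
instance (lines : List String) (out : List String × List String × List String) : Decidable (Spec_readSentences lines out) := by unfold Spec_readSentences; infer_instance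

-- ===== CLAIM (what is proved, stated in full; the proofs are below) =====
def Claim_equal_readSentences : Prop := ∀ (lines : List String), Dom_readSentences lines → Pre_readSentences lines → Spec_readSentences lines (readSentences lines)

-- ===== LEMMAS AND PROOFS =====
set_option maxHeartbeats 800000

def renderS (b : List (String × String × String)) : String := PySem.Str.join "" (b.map sentPart)
def renderG (b : List (String × String × String)) : String := PySem.Str.join "" (b.map goldPart)
def renderP (b : List (String × String × String)) : String := PySem.Str.join "" (b.map predPart)

-- the image of a B-fold state as an A-fold state
def stateOf (st : List (List (String × String × String)) × List (String × String × String)) :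
    (List String × List String × List String) × (String × String × String) :=
  ((st.1.map renderS, st.1.map renderG, st.1.map renderP),
   (renderS st.2, renderG st.2, renderP st.2))

theorem join_empty_cons (p : String) (ps : List String) :
    PySem.Str.join "" (p :: ps) = p ++ PySem.Str.join "" ps := by
  cases ps with
  | nil => simp [PySem.Str.join, PySem.Chars.join_singleton, PySem.Chars.join_nil]
  | cons q rest => simp [PySem.Str.join, PySem.Chars.join_cons_cons]

theorem join_empty_snoc (ps : List String) (p : String) :
    PySem.Str.join "" (ps ++ [p]) = PySem.Str.join "" ps ++ p := by
  induction ps with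
  | nil => simp [PySem.Str.join, PySem.Chars.join_singleton, PySem.Chars.join_nil]
  | cons q rest ih =>
    rw [List.cons_append, join_empty_cons, join_empty_cons, ih, String.append_assoc]

theorem render_snoc (f : List (String × String × String) → String)
    (g : String × String × String → String)
    (hf : ∀ b, f b = PySem.Str.join "" (b.map g)) (b : List (String × String × String))
    (t : String × String × String) :
    f (b ++ [t]) = f b ++ g t := by
  rw [hf, hf, List.map_append, List.map_singleton, join_empty_snoc]

theorem render_nil (f : List (String × String × String) → String)
    (g : String × String × String → String)
    (hf : ∀ b, f b = PySem.Str.join "" (b.map g)) : f [] = "" := by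
  rw [hf]; simp [PySem.Str.join, PySem.Chars.join_nil]

theorem len_ne_zero (t : String) (h : ¬ t = "") : (PySem.Str.len t == 0) = false := by
  simp only [PySem.Str.len, beq_eq_false_iff_ne, ne_eq, Nat.cast_eq_zero,
    List.length_eq_zero_iff, String.toList_eq_nil_iff]
  exact h

theorem sentPart_eval (a b c : String) : sentPart (a, b, c) = " " ++ a := rfl
theorem goldPart_eval (a b c : String) :
    goldPart (a, b, c) = " " ++ a ++ (if b == "O" then "" else "/" ++ b) := rfl
theorem predPart_eval (a b c : String) :
    predPart (a, b, c) = " " ++ a ++ (if c == "O" then "" else "/" ++ c) := rfl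

theorem step_comm (st : List (List (String × String × String)) × List (String × String × String))
    (line : String) :
    readAStep (stateOf st) line = stateOf (blocksStep st line) := by
  by_cases h : PySem.Str.strip line = ""
  · simp only [readAStep, blocksStep, stateOf, if_pos, h, beq_self_eq_true]
    refine congrArg₂ Prod.mk ?_ ?_
    · simp only [List.map_append, List.map_singleton]
    · rw [render_nil renderS sentPart (fun _ => rfl),
          render_nil renderG goldPart (fun _ => rfl),
          render_nil renderP predPart (fun _ => rfl)]
  · have hc := len_ne_zero _ h
    have hb : (PySem.Str.strip line == "") = false := by simp [h]
    simp only [readAStep, blocksStep, stateOf, hc, hb, Bool.false_eq_true, if_false]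
    refine congrArg₂ Prod.mk rfl ?_
    rw [render_snoc renderS sentPart (fun _ => rfl),
        render_snoc renderG goldPart (fun _ => rfl),
        render_snoc renderP predPart (fun _ => rfl)]
    rw [sentPart_eval, goldPart_eval, predPart_eval]
    simp only [String.append_assoc]

theorem fold_comm (lines : List String)
    (st : List (List (String × String × String)) × List (String × String × String)) :
    lines.foldl readAStep (stateOf st) = stateOf (lines.foldl blocksStep st) := by
  induction lines generalizing st with
  | nil => rfl
  | cons line rest ih => rw [List.foldl_cons, List.foldl_cons, step_comm, ih]

-- ===== VERDICT (by name: the statement is the Claim_ definition above) =====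
theorem readSentences_spec : Claim_equal_readSentences := by
  intro lines _ _
  unfold Spec_readSentences readSentences readSentences_alt
  have h0 : (([], [], []), ("", "", "")) = stateOf (([], []) :
      List (List (String × String × String)) × List (String × String × String)) := by
    simp [stateOf, renderS, renderG, renderP, PySem.Str.join, PySem.Chars.join_nil]
  rw [h0, fold_comm]
  rfl
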